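-- pv_equiv track=rewrite | github.com/MaxwellMasaitis/Steinhaus-Graph-Research | twoOnesBinaryGenerator.py | binaryStrings
-- ===== SOURCE A (Python) =====
-- def binaryStrings(verts):
--     maxZeroes = verts - 3
--     listOfBinaries = []
--
--     for r in range(0,maxZeroes + 1):
--         for s in range(0,maxZeroes + 1 - r):
--             t = maxZeroes - r - s
--             string = r * '0' + '1' + s * '0' + '1' + t * '0'
--             if not string in listOfBinaries and not string[::-1] in listOfBinaries:
--                 listOfBinaries.append(string)
--
--     return listOfBinaries
-- ===== SOURCE B (Python) =====
-- def binaryStrings(verts):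
--     maxZeroes = verts - 3
--     listOfBinaries = []
--     for r in range(0, maxZeroes + 1):
--         for s in range(0, maxZeroes + 1 - r):
--             t = maxZeroes - r - s
--             # the reverse of the string for (r, s, t) is the string for (t, s, r),
--             # which was emitted earlier iff t < r; so keep exactly the canonical r <= t
--             if r <= t:
--                 listOfBinaries.append(r * '0' + '1' + s * '0' + '1' + t * '0')
--     return listOfBinaries
-- ===== Notes on version B (the rewrite author's own statement) =====
-- stated objective: faster
-- what changed: replaced the search-based dedup (membership test of the string and its reverse in the growing result list) by the arithmetic canonicity test r <= t, which exactly characterises 'reverse not emitted earlier'; the list is built directly with no per-item scan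
import Mathlib
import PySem

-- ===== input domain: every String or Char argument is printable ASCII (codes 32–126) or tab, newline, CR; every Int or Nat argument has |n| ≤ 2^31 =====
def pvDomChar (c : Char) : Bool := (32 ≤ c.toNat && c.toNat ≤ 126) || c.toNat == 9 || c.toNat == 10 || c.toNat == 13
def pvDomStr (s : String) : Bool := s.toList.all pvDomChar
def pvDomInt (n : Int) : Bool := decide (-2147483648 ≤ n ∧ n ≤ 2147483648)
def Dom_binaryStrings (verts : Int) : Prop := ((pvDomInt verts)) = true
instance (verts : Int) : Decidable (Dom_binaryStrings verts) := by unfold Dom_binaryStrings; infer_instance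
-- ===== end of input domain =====

-- B replaces A's search-based dedup (membership scan of the string and its reverse in the
-- growing result list) by the arithmetic canonicity test r ≤ t; same strings, same order.

-- ===== PORT A =====
-- the string r*'0' + '1' + s*'0' + '1' + t*'0' (both Pythons build exactly this expression)
def pvMkChars (r s t : Nat) : List Char :=
  List.replicate r '0' ++ '1' :: (List.replicate s '0' ++ '1' :: List.replicate t '0')

def pvMkStr (r s t : Int) : String := String.ofList (pvMkChars r.toNat s.toNat t.toNat)

-- the inner 'for s in range(0, maxZeroes + 1 - r)' loop of A
def pvInnerA (mz r : Int) (acc : List String) : List String :=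
  (PySem.List.pyRange 0 (mz + 1 - r) 1).foldl
    (fun acc2 s =>
      let t := mz - r - s
      let string := pvMkStr r s t
      -- string[::-1] is the character-wise reverse (PySem.Str.slice?_none_none_neg_one)
      if string ∉ acc2 ∧ String.ofList string.toList.reverse ∉ acc2 then
        acc2 ++ [string]
      else acc2)
    acc

def binaryStrings (verts : Int) : List String :=
  let maxZeroes := verts - 3
  (PySem.List.pyRange 0 (maxZeroes + 1) 1).foldl
    (fun acc r => pvInnerA maxZeroes r acc) []

-- ===== PORT B =====
def binaryStrings_alt (verts : Int) : List String :=
  let maxZeroes := verts - 3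
  (PySem.List.pyRange 0 (maxZeroes + 1) 1).foldl
    (fun acc r =>
      (PySem.List.pyRange 0 (maxZeroes + 1 - r) 1).foldl
        (fun acc2 s =>
          let t := maxZeroes - r - s
          if r ≤ t then acc2 ++ [pvMkStr r s t] else acc2)
        acc)
    []

-- ===== PRECONDITION & SPEC =====
def Spec_binaryStrings (verts : Int) (out : List String) : Prop := out = binaryStrings_alt verts
instance (verts : Int) (out : List String) : Decidable (Spec_binaryStrings verts out) := by unfold Spec_binaryStrings; infer_instance

-- ===== CLAIM (what is proved, stated in full; the proofs are below) =====
def Claim_equal_binaryStrings : Prop := ∀ (verts : Int), Dom_binaryStrings verts → Spec_binaryStrings verts (binaryStrings verts)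

-- ===== LEMMAS AND PROOFS =====

-- the strings B appends for r, with s ranging over S
def pvPart (mz r : Int) (S : List Int) : List String :=
  (S.filter (fun s => decide (r ≤ mz - r - s))).map (fun s => pvMkStr r s (mz - r - s))

-- the strings B appends with r ranging over R (full inner range each)
def pvCanon (mz : Int) (R : List Int) : List String :=
  R.flatMap (fun r => pvPart mz r (PySem.List.pyRange 0 (mz + 1 - r) 1))

-- the body of A's inner loop, named so the loop invariant can be stated
def pvStepA (acc2 : List String) (str : String) : List String :=
  if str ∉ acc2 ∧ String.ofList str.toList.reverse ∉ acc2 then acc2 ++ [str] else acc2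

theorem pvInnerA_eq_foldl (mz r : Int) (acc : List String) :
    pvInnerA mz r acc
      = (PySem.List.pyRange 0 (mz + 1 - r) 1).foldl
          (fun acc2 s => pvStepA acc2 (pvMkStr r s (mz - r - s))) acc := rfl

theorem rep_one_inj (a : Nat) : ∀ (a' : Nat) (u u' : List Char),
    List.replicate a '0' ++ '1' :: u = List.replicate a' '0' ++ '1' :: u' → a = a' ∧ u = u' := by
  induction a with
  | zero =>
      intro a' u u' h
      cases a' with
      | zero => simp_all
      | succ m => simp [List.replicate_succ] at h
  | succ n ih =>
      intro a' u u' h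
      cases a' with
      | zero => simp [List.replicate_succ] at h
      | succ m =>
          simp only [List.replicate_succ, List.cons_append, List.cons.injEq] at h
          rcases ih m u u' h.2 with ⟨h1, h2⟩
          exact ⟨by omega, h2⟩

theorem pvMkStr_inj {r s t r' s' t' : Int} (hr : 0 ≤ r) (hs : 0 ≤ s) (ht : 0 ≤ t)
    (hr' : 0 ≤ r') (hs' : 0 ≤ s') (ht' : 0 ≤ t')
    (h : pvMkStr r s t = pvMkStr r' s' t') : r = r' ∧ s = s' ∧ t = t' := by
  unfold pvMkStr at h
  have h2 := String.ofList_inj.mp h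
  unfold pvMkChars at h2
  obtain ⟨h3, h4⟩ := rep_one_inj _ _ _ _ h2
  obtain ⟨h5, h6⟩ := rep_one_inj _ _ _ _ h4
  have h7 : t.toNat = t'.toNat := by
    have := congrArg List.length h6; simpa using this
  omega

theorem rev_pvMkStr (r s t : Int) :
    String.ofList (pvMkStr r s t).toList.reverse = pvMkStr t s r := by
  simp [pvMkStr, pvMkChars, List.reverse_append]

theorem mem_pvPart {x : String} {mz r : Int} {S : List Int} :
    x ∈ pvPart mz r S ↔ ∃ s ∈ S, r ≤ mz - r - s ∧ x = pvMkStr r s (mz - r - s) := by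
  simp only [pvPart, List.mem_map, List.mem_filter, decide_eq_true_eq]
  tauto

theorem mem_pvCanon {x : String} {mz : Int} {R : List Int} :
    x ∈ pvCanon mz R ↔
      ∃ r ∈ R, ∃ s, (0 ≤ s ∧ s < mz + 1 - r) ∧ r ≤ mz - r - s ∧ x = pvMkStr r s (mz - r - s) := by
  simp [pvCanon, mem_pvPart, PySem.List.mem_pyRange_one]

-- the string for (r,s,t) itself is never already in the accumulator
theorem str_not_mem (mz r s : Int) (hr : 0 ≤ r) (hs : 0 ≤ s) (hrs : r + s ≤ mz) :
    pvMkStr r s (mz - r - s)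
      ∉ pvCanon mz (PySem.List.pyRange 0 r 1) ++ pvPart mz r (PySem.List.pyRange 0 s 1) := by
  intro h
  rcases List.mem_append.mp h with h | h
  · rcases mem_pvCanon.mp h with ⟨r', hr', s', ⟨hs0', hs1'⟩, _, he⟩
    rw [PySem.List.mem_pyRange_one] at hr'
    have := pvMkStr_inj hr hs (by omega) (by omega) hs0' (by omega) he
    omega
  · rcases mem_pvPart.mp h with ⟨s', hs', _, he⟩
    rw [PySem.List.mem_pyRange_one] at hs'
    have := pvMkStr_inj hr hs (by omega) hr (by omega) (by omega) he
    omega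

-- the reverse, the string for (t,s,r), is in the accumulator exactly when t < r
theorem rev_mem_iff (mz r s : Int) (hr : 0 ≤ r) (hs : 0 ≤ s) (hrs : r + s ≤ mz) :
    (pvMkStr (mz - r - s) s r
        ∈ pvCanon mz (PySem.List.pyRange 0 r 1) ++ pvPart mz r (PySem.List.pyRange 0 s 1))
      ↔ mz - r - s < r := by
  constructor
  · intro h
    rcases List.mem_append.mp h with h | h
    · rcases mem_pvCanon.mp h with ⟨r', hr', s', ⟨hs0', hs1'⟩, _, he⟩
      rw [PySem.List.mem_pyRange_one] at hr'
      have := pvMkStr_inj (by omega) hs hr (by omega) hs0' (by omega) he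
      omega
    · rcases mem_pvPart.mp h with ⟨s', hs', _, he⟩
      rw [PySem.List.mem_pyRange_one] at hs'
      have := pvMkStr_inj (by omega) hs hr hr (by omega) (by omega) he
      omega
  · intro h
    apply List.mem_append.mpr
    left
    apply mem_pvCanon.mpr
    refine ⟨mz - r - s, ?_, s, ⟨hs, by omega⟩, by omega, by ring_nf⟩
    rw [PySem.List.mem_pyRange_one]; omega

theorem pvPart_snoc (mz r s : Int) (hs : 0 ≤ s) :
    pvPart mz r (PySem.List.pyRange 0 (s + 1) 1)
      = pvPart mz r (PySem.List.pyRange 0 s 1)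
        ++ (if r ≤ mz - r - s then [pvMkStr r s (mz - r - s)] else []) := by
  rw [PySem.List.pyRange_one_succ_right (by omega)]
  by_cases h : r ≤ mz - r - s <;> simp [pvPart, List.filter_append, h]

-- A's inner loop, from s on, completes the pvPart prefix to the full pvPart for this r
theorem innerA_inv (mz r : Int) (hr0 : 0 ≤ r) :
    ∀ (n : Nat) (s : Int), 0 ≤ s → s ≤ mz + 1 - r → n = (mz + 1 - r - s).toNat →
    (PySem.List.pyRange s (mz + 1 - r) 1).foldl
        (fun acc2 s' => pvStepA acc2 (pvMkStr r s' (mz - r - s')))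
        (pvCanon mz (PySem.List.pyRange 0 r 1) ++ pvPart mz r (PySem.List.pyRange 0 s 1))
      = pvCanon mz (PySem.List.pyRange 0 r 1)
        ++ pvPart mz r (PySem.List.pyRange 0 (mz + 1 - r) 1) := by
  intro n
  induction n with
  | zero =>
      intro s hs0 hs1 hn
      have hse : s = mz + 1 - r := by omega
      rw [hse, PySem.List.pyRange_one_eq_nil (le_refl (mz + 1 - r))]
      rfl
  | succ k ih =>
      intro s hs0 hs1 hn
      rw [PySem.List.pyRange_one_cons (show s < mz + 1 - r by omega), List.foldl_cons]
      have hstep : pvStepA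
            (pvCanon mz (PySem.List.pyRange 0 r 1) ++ pvPart mz r (PySem.List.pyRange 0 s 1))
            (pvMkStr r s (mz - r - s))
          = pvCanon mz (PySem.List.pyRange 0 r 1)
            ++ pvPart mz r (PySem.List.pyRange 0 (s + 1) 1) := by
        unfold pvStepA
        rw [rev_pvMkStr]
        by_cases hc : r ≤ mz - r - s
        · rw [if_pos ⟨str_not_mem mz r s hr0 hs0 (by omega),
                (rev_mem_iff mz r s hr0 hs0 (by omega)).not.mpr (by omega)⟩]
          rw [pvPart_snoc mz r s hs0, if_pos hc, List.append_assoc]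
        · rw [if_neg (by
            intro hcon
            exact hcon.2 ((rev_mem_iff mz r s hr0 hs0 (by omega)).mpr (by omega)))]
          rw [pvPart_snoc mz r s hs0, if_neg hc, List.append_nil]
      rw [hstep]
      exact ih (s + 1) (by omega) (by omega) (by omega)

theorem pvCanon_snoc (mz r : Int) (hr : 0 ≤ r) :
    pvCanon mz (PySem.List.pyRange 0 (r + 1) 1)
      = pvCanon mz (PySem.List.pyRange 0 r 1)
        ++ pvPart mz r (PySem.List.pyRange 0 (mz + 1 - r) 1) := by
  rw [PySem.List.pyRange_one_succ_right (by omega)]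
  simp [pvCanon]

-- A's outer loop, from r on, completes the pvCanon prefix to the full pvCanon
theorem outerA_inv (mz : Int) :
    ∀ (n : Nat) (r : Int), 0 ≤ r → r ≤ mz + 1 → n = (mz + 1 - r).toNat →
    (PySem.List.pyRange r (mz + 1) 1).foldl
        (fun acc r' => pvInnerA mz r' acc)
        (pvCanon mz (PySem.List.pyRange 0 r 1))
      = pvCanon mz (PySem.List.pyRange 0 (mz + 1) 1) := by
  intro n
  induction n with
  | zero =>
      intro r hr0 hr1 hn
      have hre : r = mz + 1 := by omega
      rw [hre, PySem.List.pyRange_one_eq_nil (le_refl (mz + 1))]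
      rfl
  | succ k ih =>
      intro r hr0 hr1 hn
      rw [PySem.List.pyRange_one_cons (show r < mz + 1 by omega), List.foldl_cons]
      have hinner : pvInnerA mz r (pvCanon mz (PySem.List.pyRange 0 r 1))
          = pvCanon mz (PySem.List.pyRange 0 (r + 1) 1) := by
        rw [pvInnerA_eq_foldl]
        have h0 : pvPart mz r (PySem.List.pyRange 0 (0 : Int) 1) = [] := by
          rw [PySem.List.pyRange_one_eq_nil (by omega)]; rfl
        have := innerA_inv mz r hr0 (mz + 1 - r).toNat 0 (by omega) (by omega) (by omega)
        rw [h0, List.append_nil] at this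
        rw [this, pvCanon_snoc mz r hr0]
      rw [hinner]
      exact ih (r + 1) (by omega) (by omega) (by omega)

theorem alt_eq_canon (verts : Int) :
    binaryStrings_alt verts = pvCanon (verts - 3) (PySem.List.pyRange 0 (verts - 3 + 1) 1) := by
  unfold binaryStrings_alt pvCanon
  have hin : ∀ (r : Int) (acc : List String),
      (PySem.List.pyRange 0 (verts - 3 + 1 - r) 1).foldl
          (fun acc2 s => if r ≤ verts - 3 - r - s then acc2 ++ [pvMkStr r s (verts - 3 - r - s)] else acc2)
          acc
        = acc ++ pvPart (verts - 3) r (PySem.List.pyRange 0 (verts - 3 + 1 - r) 1) := by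
    intro r acc
    unfold pvPart
    rw [← PySem.List.foldl_append_if]
    simp
  simp only [hin]
  rw [PySem.List.foldl_append_eq_flatMap]
  simp

-- ===== VERDICT (by name: the statement is the Claim_ definition above) =====
theorem binaryStrings_spec : Claim_equal_binaryStrings := by
  intro verts _
  unfold Spec_binaryStrings
  rw [alt_eq_canon]
  have hA : binaryStrings verts
      = (PySem.List.pyRange 0 (verts - 3 + 1) 1).foldl
          (fun acc r => pvInnerA (verts - 3) r acc) [] := rfl
  rw [hA]
  by_cases h : 0 ≤ verts - 3
  · have h0 : pvCanon (verts - 3) (PySem.List.pyRange 0 (0 : Int) 1) = [] := by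
      rw [PySem.List.pyRange_one_eq_nil (le_refl (0 : Int))]; rfl
    have := outerA_inv (verts - 3) (verts - 3 + 1).toNat 0 (by omega) (by omega) (by omega)
    rw [h0] at this
    exact this
  · rw [PySem.List.pyRange_one_eq_nil (show verts - 3 + 1 ≤ 0 by omega)]
    rfl
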